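-- pv_equiv track=rewrite | github.com/rpadaki/swarm-lang | swarm/formatter.py | _count_braces
-- ===== SOURCE A (Python) =====
-- def _count_braces(line: str) -> tuple[int, int]:
--     """Count { and } in a line, ignoring those inside // comments and strings."""
--     opens = 0
--     closes = 0
--     in_string = False
--     i = 0
--     while i < len(line):
--         ch = line[i]
--         if ch == '"':
--             in_string = not in_string
--         elif not in_string:
--             if ch == '/' and i + 1 < len(line) and line[i + 1] == '/':
--                 break
--             if ch == '{':
--                 opens += 1
--             elif ch == '}':
--                 closes += 1
--         i += 1
--     return opens, closes
-- ===== SOURCE B (Python) =====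
-- def _count_braces(line: str) -> tuple[int, int]:
--     """Count { and } in a line, ignoring those inside // comments and strings."""
--     opens = 0
--     closes = 0
--     rest = line
--     while True:
--         # code region: runs up to the next quote (or to the end of the line)
--         q = rest.find('"')
--         code = rest if q == -1 else rest[:q]
--         cut = code.find('//')
--         if cut != -1:
--             code = code[:cut]
--         opens += code.count('{')
--         closes += code.count('}')
--         if cut != -1 or q == -1:
--             return (opens, closes)
--         # string literal: skip to its closing quote
--         end = rest.find('"', q + 1)
--         if end == -1:
--             return (opens, closes)
--         rest = rest[end + 1:]
-- ===== Notes on version B (the rewrite author's own statement) =====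
-- stated objective: faster
-- what changed: Replaces A's per-character index loop with an in_string boolean state machine by a chunk loop built from substring primitives: find the next quote, cut the code region before it at the first comment marker, tally its braces with str.count, and skip each string literal wholesale with str.find, so the work is done by C-level string scans instead of a Python-level loop over every character.
import Mathlib
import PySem

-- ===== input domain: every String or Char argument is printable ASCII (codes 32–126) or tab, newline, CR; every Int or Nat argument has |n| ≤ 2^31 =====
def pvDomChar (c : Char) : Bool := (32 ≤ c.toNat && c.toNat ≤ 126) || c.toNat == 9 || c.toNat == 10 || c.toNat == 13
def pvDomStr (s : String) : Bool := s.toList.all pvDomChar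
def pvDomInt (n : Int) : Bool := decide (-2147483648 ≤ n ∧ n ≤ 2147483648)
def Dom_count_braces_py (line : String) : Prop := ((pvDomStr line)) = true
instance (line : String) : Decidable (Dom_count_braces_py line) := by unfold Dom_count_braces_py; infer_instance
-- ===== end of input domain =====

-- B replaces A's per-character in_string state machine by a chunk loop of substring
-- scans: find the next quote, cut the code region before it at the first comment
-- marker, count its braces, and skip each string literal wholesale (objective: faster).

-- ===== PORT A =====
-- while loop over i with in_string flag; the suffix from i is the recursion argument,
-- 'line[i+1]' is the head of the remaining suffix.
def countBracesLoopA : List Char → Bool → Int → Int → Int × Int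
  | [], _, opens, closes => (opens, closes)
  | ch :: rest, inString, opens, closes =>
    if ch = '"' then countBracesLoopA rest (!inString) opens closes
    else if !inString then
      if ch = '/' ∧ rest.head? = some '/' then (opens, closes)   -- break
      else if ch = '{' then countBracesLoopA rest inString (opens + 1) closes
      else if ch = '}' then countBracesLoopA rest inString opens (closes + 1)
      else countBracesLoopA rest inString opens closes
    else countBracesLoopA rest inString opens closes

def count_braces_py (line : String) : Int × Int :=
  countBracesLoopA line.toList false 0 0

-- ===== PORT B =====
-- Source B's while-True loop over the remaining suffix `rest` with the two running
-- counters; rest[:q] / code[:cut] are nonnegative slices, rest.find('"', q+1) is findFrom,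
-- rest[end+1:] is a from-slice.
-- termination helper for the chunk recursion
lemma countBracesChunk_dec (rest : List Char) (e : Int)
    (hqne : ¬ PySem.Chars.find rest ['"'] = -1)
    (hene : ¬ PySem.Chars.findFrom rest ['"'] (PySem.Chars.find rest ['"'] + 1) none = -1)
    (he : e = PySem.Chars.findFrom rest ['"'] (PySem.Chars.find rest ['"'] + 1) none) :
    (PySem.Chars.slice rest (some (e + 1)) none).length < rest.length := by
  have h1 := PySem.Chars.neg_one_le_find rest ['"']
  have hq0 : 0 ≤ PySem.Chars.find rest ['"'] := by omega
  have hspec := PySem.Chars.find_spec (s := rest) (sub := ['"']) hq0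
  have hdnn : rest.drop (PySem.Chars.find rest ['"']).toNat ≠ [] := by
    intro hn; rw [hn] at hspec; exact absurd hspec.1.length_le (by simp)
  have hqlt : (PySem.Chars.find rest ['"']).toNat < rest.length := by
    by_contra hge
    exact hdnn (List.drop_eq_nil_of_le (by omega))
  have hk : (PySem.Chars.find rest ['"'] + 1) = (((PySem.Chars.find rest ['"']).toNat + 1 : Nat) : Int) := by
    omega
  have hkle : (PySem.Chars.find rest ['"']).toNat + 1 ≤ rest.length := by omega
  rw [hk] at hene he
  rw [PySem.Chars.findFrom_natCast rest ['"'] _ hkle] at hene he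
  by_cases hz : PySem.Chars.find (rest.drop ((PySem.Chars.find rest ['"']).toNat + 1)) ['"'] = -1
  · simp [hz] at hene
  · have h2 := PySem.Chars.neg_one_le_find (rest.drop ((PySem.Chars.find rest ['"']).toNat + 1)) ['"']
    simp only [hz, if_false] at he
    have he1 : 1 ≤ e := by omega
    rw [PySem.Chars.slice_eq_listSlice, PySem.List.slice_from rest (by omega : (0:Int) ≤ e + 1)]
    simp only [List.length_drop]
    omega

def countBracesChunkB (opens closes : Int) (rest : List Char) : Int × Int :=
  let q := PySem.Chars.find rest ['"']
  let code := if q = -1 then rest else PySem.Chars.slice rest none (some q)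
  let cut := PySem.Chars.find code ['/', '/']
  let code2 := if cut != -1 then PySem.Chars.slice code none (some cut) else code
  let opens' := opens + (PySem.Chars.count code2 ['{'] : Int)
  let closes' := closes + (PySem.Chars.count code2 ['}'] : Int)
  if cut != -1 || q == -1 then (opens', closes')
  else
    let e := PySem.Chars.findFrom rest ['"'] (q + 1) none
    if e == -1 then (opens', closes')
    else countBracesChunkB opens' closes' (PySem.Chars.slice rest (some (e + 1)) none)
termination_by rest.length
decreasing_by
  rename_i hmain hee
  simp only [Bool.or_eq_true, bne_iff_ne, beq_iff_eq, not_or, Decidable.not_not] at hmain hee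
  exact countBracesChunk_dec rest _ hmain.2 (by simpa using hee) rfl
def count_braces_py_alt (line : String) : Int × Int :=
  countBracesChunkB 0 0 line.toList

-- ===== PRECONDITION & SPEC =====
def Spec_count_braces_py (line : String) (out : Int × Int) : Prop := out = count_braces_py_alt line
instance (line : String) (out : Int × Int) : Decidable (Spec_count_braces_py line out) := by unfold Spec_count_braces_py; infer_instance

-- ===== CLAIM (what is proved, stated in full; the proofs are below) =====
def Claim_equal_count_braces_py : Prop := ∀ (line : String), Dom_count_braces_py line → Spec_count_braces_py line (count_braces_py line)

-- ===== LEMMAS AND PROOFS =====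
lemma singleton_infix_iff (c : Char) (s : List Char) : [c] <:+: s ↔ c ∈ s := by
  constructor
  · intro h; exact List.singleton_sublist.mp h.sublist
  · intro h
    obtain ⟨l, r, rfl⟩ := List.append_of_mem h
    exact ⟨l, r, by simp⟩


lemma single_prefix_iff (c : Char) (l : List Char) : [c] <+: l ↔ l.head? = some c := by
  cases l with
  | nil => simp
  | cons x t => simp [List.cons_prefix_cons, eq_comm]

lemma infix_iff_prefix_drop (sub s : List Char) : sub <:+: s ↔ ∃ j, sub <+: s.drop j := by
  rw [← PySem.Chars.isIn_iff_infix, ← PySem.Chars.exists_prefix_drop_iff_isIn]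

lemma countGo_single (c : Char) :
    ∀ (fuel : Nat) (l : List Char) (acc : Nat), l.length ≤ fuel →
      PySem.Chars.count.go [c] fuel l acc = acc + l.count c := by
  intro fuel
  induction fuel with
  | zero =>
    intro l acc h
    have hl : l = [] := List.eq_nil_of_length_eq_zero (Nat.le_zero.mp h)
    subst hl
    rw [PySem.Chars.count.go.eq_def]
    simp
  | succ n ih =>
    intro l acc h
    cases l with
    | nil => rw [PySem.Chars.count.go.eq_def]; simp
    | cons x t =>
      rw [PySem.Chars.count.go.eq_def]
      simp only []
      by_cases hx : x = c
      · have hp : ([c].isPrefixOf (x :: t)) = true := by simp [List.isPrefixOf, hx]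
        simp only [hp, if_true, List.length_cons, List.drop_succ_cons, List.length_nil, List.drop_zero]
        rw [ih t (acc + 1) (by simpa using Nat.lt_succ_iff.mp (by simpa using h))]
        simp [hx]
        omega
      · have hp : ([c].isPrefixOf (x :: t)) = false := by
          simp [List.isPrefixOf]; exact fun hc => absurd hc.symm hx
        simp only [hp, Bool.false_eq_true, if_false]
        rw [ih t acc (by simpa using Nat.lt_succ_iff.mp (by simpa using h))]
        simp [hx]

lemma count_single (l : List Char) (c : Char) : PySem.Chars.count l [c] = l.count c := by
  rw [PySem.Chars.count]
  simp only [List.isEmpty_cons, Bool.false_eq_true, if_false]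
  rw [countGo_single c l.length l 0 (le_refl _)]
  omega

lemma no_mem_take_of_find_min (s : List Char) (c : Char) (k : Nat)
    (hmin : ∀ i < k, ¬ [c] <+: s.drop i) : ∀ x ∈ s.take k, x ≠ c := by
  intro x hx hc
  obtain ⟨i, hi, hgi⟩ := List.mem_iff_getElem.mp hx
  have hi2 : i < k ∧ i < s.length := by simpa using (List.length_take ▸ hi : i < (s.take k).length)
  obtain ⟨hik, his⟩ := hi2
  apply hmin i hik
  rw [single_prefix_iff]
  rw [List.head?_drop]
  rw [List.getElem?_eq_getElem his]
  rw [List.getElem_take] at hgi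
  rw [hgi, hc]

-- Source B's mutually recursive outside/inside; 'if not s' + s[0]/s[1:] is the match,
-- s[:2] == '//' is take 2 (nonnegative slice), s[j+1:] with j = s.find('"') ≥ 0 is drop (j+1).
mutual
def countBracesOutsideB : List Char → Int × Int
  | [] => (0, 0)
  | ch :: rest =>
    if List.take 2 (ch :: rest) = ['/', '/'] then (0, 0)
    else if ch = '"' then countBracesInsideB rest
    else
      let p := countBracesOutsideB rest
      (p.1 + (if ch = '{' then 1 else 0), p.2 + (if ch = '}' then 1 else 0))
termination_by s => s.length
decreasing_by all_goals simp

def countBracesInsideB (s : List Char) : Int × Int :=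
  let j := PySem.Chars.find s ['"']
  if j = -1 then (0, 0)
  else countBracesOutsideB (List.drop (j.toNat + 1) s)
termination_by s.length
decreasing_by
  have hle := PySem.Chars.neg_one_le_find s ['"']
  have hnn : 0 ≤ PySem.Chars.find s ['"'] := by omega
  have hinf : ['"'] <:+: s := (PySem.Chars.find_nonneg_iff s ['"']).mp hnn
  have hlen : 1 ≤ s.length := hinf.length_le
  simp; omega
end




lemma outsideB_scan (code tail : List Char)
    (hq : ∀ x ∈ code, x ≠ '"') (hp : ¬ ['/', '/'] <:+: code) (ht : tail.head? ≠ some '/') :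
    countBracesOutsideB (code ++ tail) =
      ((code.count '{' : Int) + (countBracesOutsideB tail).1,
       (code.count '}' : Int) + (countBracesOutsideB tail).2) := by
  induction code with
  | nil => simp
  | cons ch code' ih =>
    have hch : ch ≠ '"' := hq ch (by simp)
    rw [List.cons_append, countBracesOutsideB.eq_2]
    have hpair : ¬ (List.take 2 (ch :: (code' ++ tail)) = ['/', '/']) := by
      intro hc
      cases code' with
      | nil =>
        cases tail with
        | nil => simp at hc
        | cons y t => simp at hc; exact ht (by simp [hc.2])
      | cons z t =>
        simp at hc
        exact hp ⟨[], t, by simp [hc.1, hc.2]⟩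
    have hp' : ¬ ['/', '/'] <:+: code' := fun h => hp (h.trans (List.suffix_cons ch code').isInfix)
    rw [if_neg hpair, if_neg hch]
    rw [ih (fun x hx => hq x (by simp [hx])) hp']
    by_cases h1 : ch = '{'
    · simp [h1]; ring
    · by_cases h2 : ch = '}'
      · simp [h2]; ring
      · simp [h1, h2]

lemma outsideB_comment (pre suf : List Char)
    (hq : ∀ x ∈ pre, x ≠ '"') (hp : ¬ ['/', '/'] <:+: (pre ++ ['/'])) :
    countBracesOutsideB (pre ++ '/' :: '/' :: suf) =
      ((pre.count '{' : Int), (pre.count '}' : Int)) := by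
  induction pre with
  | nil =>
    rw [List.nil_append, countBracesOutsideB.eq_2]
    simp
  | cons ch pre' ih =>
    have hch : ch ≠ '"' := hq ch (by simp)
    rw [List.cons_append, countBracesOutsideB.eq_2]
    have hpair : ¬ (List.take 2 (ch :: (pre' ++ '/' :: '/' :: suf)) = ['/', '/']) := by
      intro hc
      cases pre' with
      | nil => simp at hc; exact hp ⟨[], [], by simp [hc]⟩
      | cons z t =>
        simp at hc
        exact hp ⟨[], t ++ ['/'], by simp [hc.1, hc.2]⟩
    have hp' : ¬ ['/', '/'] <:+: (pre' ++ ['/']) := by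
      intro h
      exact hp (h.trans (List.suffix_cons ch (pre' ++ ['/'])).isInfix)
    rw [if_neg hpair, if_neg hch]
    rw [ih (fun x hx => hq x (by simp [hx])) hp']
    by_cases h1 : ch = '{'
    · simp [h1]
    · by_cases h2 : ch = '}'
      · simp [h2]
      · simp [h1, h2]

lemma outsideB_of_comment (code r : List Char) (hqf : ∀ x ∈ code, x ≠ '"')
    (hc0 : 0 ≤ PySem.Chars.find code ['/', '/']) :
    countBracesOutsideB (code ++ r) =
      (((code.take (PySem.Chars.find code ['/', '/']).toNat).count '{' : Int),
       ((code.take (PySem.Chars.find code ['/', '/']).toNat).count '}' : Int)) := by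
  have hspec := PySem.Chars.find_spec (s := code) (sub := ['/', '/']) hc0
  obtain ⟨suf, hsuf⟩ : ∃ suf, code.drop (PySem.Chars.find code ['/', '/']).toNat = '/' :: '/' :: suf := by
    obtain ⟨r2, hr2⟩ := hspec.1
    exact ⟨r2, by rw [← hr2]; rfl⟩
  have hklen : (PySem.Chars.find code ['/', '/']).toNat < code.length := by
    by_contra hge
    rw [List.drop_eq_nil_of_le (by omega)] at hsuf
    simp at hsuf
  have hdec : code ++ r =
      code.take (PySem.Chars.find code ['/', '/']).toNat ++ '/' :: '/' :: (suf ++ r) := by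
    conv_lhs => rw [← List.take_append_drop (PySem.Chars.find code ['/', '/']).toNat code, hsuf]
    simp
  rw [hdec, outsideB_comment]
  · intro x hx; exact hqf x (List.mem_of_mem_take hx)
  · intro hinf
    obtain ⟨i, hip⟩ := (infix_iff_prefix_drop _ _).mp hinf
    have hlen1 : (code.take (PySem.Chars.find code ['/', '/']).toNat).length =
        (PySem.Chars.find code ['/', '/']).toNat := by
      simp; omega
    have hlen2 := hip.length_le
    simp only [List.length_drop, List.length_append, hlen1] at hlen2
    have hik : i < (PySem.Chars.find code ['/', '/']).toNat := by simp at hlen2; omega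
    have hpref : (code.take (PySem.Chars.find code ['/', '/']).toNat ++ ['/']) <+: code := by
      refine ⟨'/' :: suf, ?_⟩
      conv_rhs => rw [← List.take_append_drop (PySem.Chars.find code ['/', '/']).toNat code, hsuf]
      simp
    exact hspec.2 i hik (hip.trans (hpref.drop i))

lemma outsideB_quote_tail (tail : List Char) :
    countBracesOutsideB ('"' :: tail) = countBracesInsideB tail := by
  rw [countBracesOutsideB.eq_2]
  have h2 : ¬ (List.take 2 ('"' :: tail) = ['/', '/']) := by
    intro hc; cases tail <;> simp_all
  rw [if_neg h2, if_pos rfl]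

lemma chunk_eq : ∀ (n : Nat) (s : List Char), s.length ≤ n → ∀ (o c : Int),
    countBracesChunkB o c s = (o + (countBracesOutsideB s).1, c + (countBracesOutsideB s).2) := by
  intro n
  induction n with
  | zero =>
    intro s hs o c
    have hnil : s = [] := List.eq_nil_of_length_eq_zero (Nat.le_zero.mp hs)
    subst hnil
    rw [countBracesChunkB.eq_def]
    have h1 : PySem.Chars.find ([] : List Char) ['"'] = -1 := by decide
    have h2 : PySem.Chars.find ([] : List Char) ['/', '/'] = -1 := by decide
    simp [h1, h2, countBracesOutsideB.eq_1]
  | succ n ih =>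
    intro s hs o c
    rw [countBracesChunkB.eq_def]
    by_cases hq : PySem.Chars.find s ['"'] = -1
    · -- no string literal on the line: code is the whole of s
      have hqf : ∀ x ∈ s, x ≠ '"' := by
        intro x hx hxc
        exact (PySem.Chars.find_eq_neg_one_iff s ['"']).mp hq
          ((singleton_infix_iff '"' s).mpr (hxc ▸ hx))
      simp only [hq, beq_self_eq_true, Bool.or_true, if_true]
      by_cases hcut : PySem.Chars.find s ['/', '/'] = -1
      · have hnp : ¬ ['/', '/'] <:+: s := (PySem.Chars.find_eq_neg_one_iff s ['/', '/']).mp hcut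
        have hscan := outsideB_scan s [] hqf hnp (by simp)
        rw [List.append_nil] at hscan
        rw [hscan]
        simp [hcut, countBracesOutsideB.eq_1, count_single]
      · have hc0 : 0 ≤ PySem.Chars.find s ['/', '/'] := by
          have := PySem.Chars.neg_one_le_find s ['/', '/']; omega
        have hcom := outsideB_of_comment s [] hqf hc0
        rw [List.append_nil] at hcom
        rw [hcom]
        have hb : ((PySem.Chars.find s ['/', '/'] != -1) = true) := by simp [hcut]
        simp only [hb, if_true]
        rw [PySem.Chars.slice_eq_listSlice, PySem.List.slice_to s hc0]
        simp [count_single]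
    · -- a quote at index q: code = s[:q], the literal spans to the next quote
      have hq0 : 0 ≤ PySem.Chars.find s ['"'] := by
        have := PySem.Chars.neg_one_le_find s ['"']; omega
      have hspec := PySem.Chars.find_spec (s := s) (sub := ['"']) hq0
      obtain ⟨tail, htail⟩ : ∃ t, s.drop (PySem.Chars.find s ['"']).toNat = '"' :: t := by
        obtain ⟨r2, hr2⟩ := hspec.1
        exact ⟨r2, by rw [← hr2]; rfl⟩
      have hqlt : (PySem.Chars.find s ['"']).toNat < s.length := by
        by_contra hge
        rw [List.drop_eq_nil_of_le (by omega)] at htail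
        simp at htail
      have hdecomp : s = s.take (PySem.Chars.find s ['"']).toNat ++ '"' :: tail := by
        conv_lhs => rw [← List.take_append_drop (PySem.Chars.find s ['"']).toNat s, htail]
      have hpreq : ∀ x ∈ s.take (PySem.Chars.find s ['"']).toNat, x ≠ '"' :=
        no_mem_take_of_find_min s '"' _ hspec.2
      have hcode : PySem.Chars.slice s none (some (PySem.Chars.find s ['"'])) =
          s.take (PySem.Chars.find s ['"']).toNat := by
        rw [PySem.Chars.slice_eq_listSlice, PySem.List.slice_to s hq0]
      simp only [hq, if_false, hcode]
      have hqb : ((PySem.Chars.find s ['"'] == -1) = false) := by simp [hq]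
      by_cases hcut : PySem.Chars.find (s.take (PySem.Chars.find s ['"']).toNat) ['/', '/'] = -1
      · -- no comment before the quote
        have hnp : ¬ ['/', '/'] <:+: s.take (PySem.Chars.find s ['"']).toNat :=
          (PySem.Chars.find_eq_neg_one_iff _ ['/', '/']).mp hcut
        have hcb : ((PySem.Chars.find (s.take (PySem.Chars.find s ['"']).toNat) ['/', '/'] != -1) = false) := by
          simp [hcut]
        simp only [hcut, hqb]
        have hk : PySem.Chars.find s ['"'] + 1 = (((PySem.Chars.find s ['"']).toNat + 1 : Nat) : Int) := by
          omega
        have hkle : (PySem.Chars.find s ['"']).toNat + 1 ≤ s.length := by omega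
        have hdroptail : s.drop ((PySem.Chars.find s ['"']).toNat + 1) = tail := by
          rw [← List.drop_drop, htail, List.drop_one, List.tail_cons]
        rw [hk, PySem.Chars.findFrom_natCast s ['"'] _ hkle, hdroptail]
        have hscan := outsideB_scan (s.take (PySem.Chars.find s ['"']).toNat) ('"' :: tail)
          hpreq hnp (by simp)
        by_cases hj : PySem.Chars.find tail ['"'] = -1
        · simp only [hj, beq_self_eq_true, if_true]
          conv_rhs => rw [hdecomp]
          rw [hscan, outsideB_quote_tail, countBracesInsideB.eq_1, if_pos hj]
          simp [count_single]
        · have hj0 : 0 ≤ PySem.Chars.find tail ['"'] := by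
            have := PySem.Chars.neg_one_le_find tail ['"']; omega
          have hene : ¬ ((((PySem.Chars.find s ['"']).toNat + 1 : Nat) : Int) +
              PySem.Chars.find tail ['"'] = -1) := by omega
          simp only [hj, if_false, beq_iff_eq, hene]
          have harg : PySem.Chars.slice s
              (some ((((PySem.Chars.find s ['"']).toNat + 1 : Nat) : Int) + PySem.Chars.find tail ['"'] + 1)) =
              tail.drop ((PySem.Chars.find tail ['"']).toNat + 1) := by
            rw [PySem.Chars.slice_eq_listSlice, PySem.List.slice_from s (by omega)]
            have h1 : ((((PySem.Chars.find s ['"']).toNat + 1 : Nat) : Int) +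
                PySem.Chars.find tail ['"'] + 1).toNat =
                ((PySem.Chars.find s ['"']).toNat + 1) + ((PySem.Chars.find tail ['"']).toNat + 1) := by
              omega
            rw [h1, ← List.drop_drop, hdroptail]
          rw [harg]
          have htlen : tail.length ≤ n := by
            have := congrArg List.length hdecomp
            simp at this
            omega
          rw [ih (tail.drop ((PySem.Chars.find tail ['"']).toNat + 1)) (by simp; omega) _ _]
          conv_rhs => rw [hdecomp]
          rw [hscan, outsideB_quote_tail, countBracesInsideB.eq_1, if_neg hj]
          simp [count_single]
          constructor <;> ring
      · -- comment inside the code region before the quote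
        have hc0 : 0 ≤ PySem.Chars.find (s.take (PySem.Chars.find s ['"']).toNat) ['/', '/'] := by
          have := PySem.Chars.neg_one_le_find (s.take (PySem.Chars.find s ['"']).toNat) ['/', '/']
          omega
        have hcb : ((PySem.Chars.find (s.take (PySem.Chars.find s ['"']).toNat) ['/', '/'] != -1) = true) := by
          simp [hcut]
        simp only [hcb, Bool.true_or, if_true]
        have hcom := outsideB_of_comment (s.take (PySem.Chars.find s ['"']).toNat) ('"' :: tail)
          hpreq hc0
        conv_rhs => rw [hdecomp]
        rw [hcom]
        rw [PySem.Chars.slice_eq_listSlice, PySem.List.slice_to _ hc0]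
        simp [count_single]


-- find.go at offset k, versus offset 0 (specific to the single-quote needle)
lemma findGo_shift (t : List Char) (k : Nat) :
    PySem.Chars.find.go ['"'] t k =
      if PySem.Chars.find.go ['"'] t 0 = -1 then -1 else PySem.Chars.find.go ['"'] t 0 + k := by
  induction t generalizing k with
  | nil => simp [PySem.Chars.find.go.eq_1]
  | cons c t ih =>
    rw [PySem.Chars.find.go.eq_2, PySem.Chars.find.go.eq_2]
    by_cases hp : (['"'].isPrefixOf (c :: t)) = true
    · simp [hp]
    · simp only [hp, Bool.false_eq_true, if_false]
      have h0' : -1 ≤ PySem.Chars.find.go ['"'] t 0 := PySem.Chars.neg_one_le_find t ['"']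
      rw [ih (k + 1), ih 1]
      by_cases hz : PySem.Chars.find.go ['"'] t 0 = -1
      · simp [hz]
      · have : ¬ (PySem.Chars.find.go ['"'] t 0 + 1 = -1) := by omega
        simp [hz, this]; omega

lemma findQuote_cons (ch : Char) (rest : List Char) (h : ch ≠ '"') :
    PySem.Chars.find (ch :: rest) ['"'] =
      if PySem.Chars.find rest ['"'] = -1 then -1 else PySem.Chars.find rest ['"'] + 1 := by
  show PySem.Chars.find.go ['"'] (ch :: rest) 0 = _
  rw [PySem.Chars.find.go.eq_2]
  have hp : (['"'].isPrefixOf (ch :: rest)) = false := by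
    simp [List.isPrefixOf]; exact fun hc => absurd hc.symm h
  simp only [hp, Bool.false_eq_true, if_false]
  exact findGo_shift rest 1

lemma countBracesInsideB_cons (ch : Char) (rest : List Char) (h : ch ≠ '"') :
    countBracesInsideB (ch :: rest) = countBracesInsideB rest := by
  rw [countBracesInsideB.eq_1, countBracesInsideB.eq_1]
  simp only [findQuote_cons ch rest h]
  by_cases hz : PySem.Chars.find rest ['"'] = -1
  · simp [hz]
  · have hle := PySem.Chars.neg_one_le_find rest ['"']
    have hne : ¬ (PySem.Chars.find rest ['"'] + 1 = -1) := by omega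
    have htn : (PySem.Chars.find rest ['"'] + 1).toNat = (PySem.Chars.find rest ['"']).toNat + 1 := by
      omega
    simp [hz, hne, htn]

lemma countBracesInsideB_quote (rest : List Char) :
    countBracesInsideB ('"' :: rest) = countBracesOutsideB rest := by
  rw [countBracesInsideB.eq_1]
  have hf : PySem.Chars.find ('"' :: rest) ['"'] = 0 := by
    show PySem.Chars.find.go ['"'] ('"' :: rest) 0 = 0
    rw [PySem.Chars.find.go.eq_2]
    simp [List.isPrefixOf]
  simp [hf]

-- the combined invariant: A's loop from state inString equals the matching
-- char-structural processor, shifted by the accumulators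
lemma countBraces_main : ∀ n (s : List Char), s.length ≤ n →
    (∀ opens closes, countBracesLoopA s false opens closes =
        (opens + (countBracesOutsideB s).1, closes + (countBracesOutsideB s).2)) ∧
    (∀ opens closes, countBracesLoopA s true opens closes =
        (opens + (countBracesInsideB s).1, closes + (countBracesInsideB s).2)) := by
  intro n
  induction n with
  | zero =>
    intro s hs
    have : s = [] := List.eq_nil_of_length_eq_zero (Nat.le_zero.mp hs)
    subst this
    constructor <;> intro opens closes <;>
      simp [countBracesLoopA, countBracesOutsideB.eq_1, countBracesInsideB.eq_1]
  | succ n ih =>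
    intro s hs
    match s with
    | [] =>
      constructor <;> intro opens closes <;>
        simp [countBracesLoopA, countBracesOutsideB.eq_1, countBracesInsideB.eq_1]
    | ch :: rest =>
      have hr : rest.length ≤ n := by simpa using Nat.lt_succ_iff.mp (by simpa using hs)
      obtain ⟨ih1, ih2⟩ := ih rest hr
      constructor
      · -- outside / inString = false
        intro opens closes
        by_cases hq : ch = '"'
        · subst hq
          rw [countBracesOutsideB.eq_2]
          have ht : ¬ (List.take 2 ('"' :: rest) = ['/', '/']) := by
            intro hc; cases rest <;> simp_all
          simp only [countBracesLoopA, Bool.not_false, ht, if_false]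
          simpa using ih2 opens closes
        · rw [countBracesOutsideB.eq_2]
          by_cases hcm : ch = '/' ∧ rest.head? = some '/'
          · have ht : List.take 2 (ch :: rest) = ['/', '/'] := by
              obtain ⟨h1, h2⟩ := hcm
              cases rest with
              | nil => simp at h2
              | cons c t => simp at h2; simp [h1, h2]
            rw [if_pos ht]
            simp [countBracesLoopA, hcm]
          · have ht : ¬ (List.take 2 (ch :: rest) = ['/', '/']) := by
              intro hc
              cases rest with
              | nil => simp at hc
              | cons c t =>
                simp at hc
                exact hcm ⟨hc.1, by simp [hc.2]⟩
            simp only [countBracesLoopA, hq, if_false, Bool.not_false, if_true, hcm, ht]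
            by_cases h1 : ch = '{'
            · simp [h1, ih1 (opens + 1) closes]; omega
            · by_cases h2 : ch = '}'
              · simp [h2, ih1 opens (closes + 1)]; omega
              · simp [h1, h2, ih1 opens closes]
      · -- inside / inString = true
        intro opens closes
        by_cases hq : ch = '"'
        · subst hq
          rw [countBracesInsideB_quote]
          simp only [countBracesLoopA, Bool.not_true]
          simpa using ih1 opens closes
        · rw [countBracesInsideB_cons ch rest hq]
          simp only [countBracesLoopA, hq, if_false, Bool.not_true, Bool.false_eq_true]
          exact ih2 opens closes

-- ===== VERDICT (by name: the statement is the Claim_ definition above) =====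
theorem count_braces_py_spec : Claim_equal_count_braces_py := by
  intro line _
  unfold Spec_count_braces_py count_braces_py count_braces_py_alt
  obtain ⟨h1, _⟩ := countBraces_main line.toList.length line.toList (le_refl _)
  rw [h1 0 0, chunk_eq line.toList.length line.toList (le_refl _) 0 0]
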